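-- pv_equiv track=rewrite | github.com/ap221882/python-DSA-CN-v1 | Recursion1/intro.py | isSortedBetter
-- ===== SOURCE A (Python) =====
-- def isSortedBetter(arr, si):
--     l = len(arr)
--     # si=0
--     if si == l or si == l-1:
--         return True
--     if arr[si] > arr[si+1]:
--         return False
--     else:
--         return isSortedBetter(arr, si+1)
-- ===== SOURCE B (Python) =====
-- def isSortedBetter(arr, si):
--     return all(arr[i] <= arr[i + 1] for i in range(si, len(arr) - 1))
-- ===== Notes on version B (the rewrite author's own statement) =====
-- stated objective: idiomatic
-- what changed: Replaced the tail recursion and its base-case branches with a single flat all(...) of adjacent comparisons over range(si, len(arr)-1); Pre_ excludes only the out-of-range si on which A raises IndexError.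
import Mathlib
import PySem

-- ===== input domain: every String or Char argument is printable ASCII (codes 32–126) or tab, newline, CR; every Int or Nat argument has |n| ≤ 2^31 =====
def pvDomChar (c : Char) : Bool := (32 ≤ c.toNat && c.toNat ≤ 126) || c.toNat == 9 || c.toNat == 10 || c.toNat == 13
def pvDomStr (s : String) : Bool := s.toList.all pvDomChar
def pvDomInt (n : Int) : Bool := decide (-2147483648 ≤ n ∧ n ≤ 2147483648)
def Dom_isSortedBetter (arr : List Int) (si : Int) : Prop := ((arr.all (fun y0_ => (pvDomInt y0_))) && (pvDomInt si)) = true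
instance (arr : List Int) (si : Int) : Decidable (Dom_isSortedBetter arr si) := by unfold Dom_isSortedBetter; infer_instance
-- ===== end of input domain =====

-- B replaces A's recursion with one flat all(...) of adjacent comparisons over range(si, len-1); same cost, flatter code.

-- ===== PORT A =====
def isSortedBetter (arr : List Int) (si : Int) : Bool :=
  if si = (arr.length : Int) ∨ si = (arr.length : Int) - 1 then true
  else
    match PySem.List.pyGet? arr si, h2 : PySem.List.pyGet? arr (si + 1) with
    | some a, some b => if a > b then false else isSortedBetter arr (si + 1)
    | _, _ => false      -- Python raises IndexError here; outside Pre_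
termination_by ((arr.length : Int) + 1 - si).toNat
decreasing_by
  have h : ¬ PySem.List.pyGet? arr (si + 1) = none := by simp [h2]
  rw [PySem.List.pyGet?_eq_none_iff, not_not] at h
  simp [PySem.Raise.InRange] at h
  omega

-- ===== PORT B =====
def isSortedBetter_alt (arr : List Int) (si : Int) : Bool :=
  (PySem.List.pyRange si ((arr.length : Int) - 1) 1).all (fun i =>
    decide (PySem.List.pyGetD arr i 0 ≤ PySem.List.pyGetD arr (i + 1) 0))

-- ===== PRECONDITION & SPEC =====
-- Pre_ excludes exactly the inputs on which Python A raises IndexError (si outside Python's index range).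
def Pre_isSortedBetter (arr : List Int) (si : Int) : Prop :=
  -(arr.length : Int) ≤ si ∧ si ≤ (arr.length : Int)
instance (arr : List Int) (si : Int) : Decidable (Pre_isSortedBetter arr si) := by
  unfold Pre_isSortedBetter; infer_instance
def pvWitness_isSortedBetter : List Int × Int := ([1, 2, 3], 0)

def Spec_isSortedBetter (arr : List Int) (si : Int) (out : Bool) : Prop := out = isSortedBetter_alt arr si
instance (arr : List Int) (si : Int) (out : Bool) : Decidable (Spec_isSortedBetter arr si out) := by unfold Spec_isSortedBetter; infer_instance

-- ===== CLAIM (what is proved, stated in full; the proofs are below) =====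
def Claim_equal_isSortedBetter : Prop := ∀ (arr : List Int) (si : Int), Dom_isSortedBetter arr si → Pre_isSortedBetter arr si → Spec_isSortedBetter arr si (isSortedBetter arr si)

-- ===== LEMMAS AND PROOFS =====

-- Under Python's index range, xs[i] succeeds and equals the defaulted access.
theorem pyGet?_eq_some_pyGetD (arr : List Int) (i : Int)
    (h1 : -(arr.length : Int) ≤ i) (h2 : i < (arr.length : Int)) :
    PySem.List.pyGet? arr i = some (PySem.List.pyGetD arr i 0) := by
  by_cases hi : 0 ≤ i
  · rw [PySem.List.pyGetD_eq_getElem arr 0 hi h2,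
        PySem.List.pyGet?_eq_some_getElem arr hi h2]
  · have hk0 : 0 < (-i).toNat := by omega
    have hkl : (-i).toNat ≤ arr.length := by omega
    have hie : i = -(((-i).toNat : Nat) : Int) := by omega
    rw [hie, PySem.List.pyGet?_neg_natCast arr _ hk0 hkl,
        PySem.List.pyGetD_neg_natCast arr _ 0 hk0 hkl,
        List.getElem?_eq_getElem (by omega)]

theorem key (arr : List Int) (si : Int)
    (h1 : -(arr.length : Int) ≤ si) (h2 : si ≤ (arr.length : Int)) :
    isSortedBetter arr si = isSortedBetter_alt arr si := by
  by_cases hc : si = (arr.length : Int) ∨ si = (arr.length : Int) - 1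
  · rw [isSortedBetter, if_pos hc]
    unfold isSortedBetter_alt
    rw [PySem.List.pyRange_one_eq_nil (by omega : (arr.length : Int) - 1 ≤ si)]
    rfl
  · have hlt : si < (arr.length : Int) - 1 := by omega
    have ha := pyGet?_eq_some_pyGetD arr si (by omega) (by omega)
    have hb := pyGet?_eq_some_pyGetD arr (si + 1) (by omega) (by omega)
    have hrec := key arr (si + 1) (by omega) (by omega)
    rw [isSortedBetter, if_neg hc]
    conv_rhs => unfold isSortedBetter_alt
    rw [PySem.List.pyRange_one_cons (by omega : si < (arr.length : Int) - 1)]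
    rw [List.all_cons, ha, hb]
    by_cases hgt : PySem.List.pyGetD arr si 0 > PySem.List.pyGetD arr (si + 1) 0
    · simp [hgt, not_le.mpr hgt]
    · simp only [if_neg hgt]
      rw [hrec]
      have hle := not_lt.mp hgt
      simp [decide_eq_true hle, isSortedBetter_alt]
termination_by ((arr.length : Int) + 1 - si).toNat
decreasing_by omega

-- ===== VERDICT (by name: the statement is the Claim_ definition above) =====
theorem isSortedBetter_spec : Claim_equal_isSortedBetter := by
  intro arr si _ hpre
  unfold Spec_isSortedBetter
  exact key arr si hpre.1 hpre.2
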